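-- pv_equiv track=rewrite | github.com/Wolf-Tungsten/wolvrix-playground | scripts/compare_register_name_sets.py | build_longest_prefix_matches
-- ===== SOURCE A (Python) =====
-- from collections import Counter, defaultdict
--
-- def build_longest_prefix_matches(bases: set[str], values: set[str]) -> dict[str, set[str]]:
--     base_to_children: dict[str, set[str]] = defaultdict(set)
--     for value in values:
--         parts = value.split("_")
--         best_base: str | None = None
--         for i in range(1, len(parts)):
--             candidate = "_".join(parts[:i])
--             if candidate not in bases:
--                 continue
--             if best_base is None or len(candidate) > len(best_base):
--                 best_base = candidate
--         if best_base is not None: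
--             base_to_children[best_base].add(value)
--     return base_to_children
-- ===== SOURCE B (Python) =====
-- from collections import defaultdict
--
--
-- def build_longest_prefix_matches(bases: set[str], values: set[str]) -> dict[str, set[str]]:
--     base_to_children: dict[str, set[str]] = defaultdict(set)
--     for value in values:
--         best = max((b for b in bases if value.startswith(b + "_")),
--                    key=len, default=None)
--         if best is not None:
--             base_to_children[best].add(value)
--     return base_to_children
-- ===== Notes on version B (the rewrite author's own statement) =====
-- stated objective: alternative
-- what changed: Instead of enumerating every proper '_'-prefix of each value (join of parts[:i]) and testing each against the bases set while tracking the longest, B scans the bases once per value, keeps those b for which value.startswith(b + '_'), and takes the longest with max(key=len).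
import Mathlib
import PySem

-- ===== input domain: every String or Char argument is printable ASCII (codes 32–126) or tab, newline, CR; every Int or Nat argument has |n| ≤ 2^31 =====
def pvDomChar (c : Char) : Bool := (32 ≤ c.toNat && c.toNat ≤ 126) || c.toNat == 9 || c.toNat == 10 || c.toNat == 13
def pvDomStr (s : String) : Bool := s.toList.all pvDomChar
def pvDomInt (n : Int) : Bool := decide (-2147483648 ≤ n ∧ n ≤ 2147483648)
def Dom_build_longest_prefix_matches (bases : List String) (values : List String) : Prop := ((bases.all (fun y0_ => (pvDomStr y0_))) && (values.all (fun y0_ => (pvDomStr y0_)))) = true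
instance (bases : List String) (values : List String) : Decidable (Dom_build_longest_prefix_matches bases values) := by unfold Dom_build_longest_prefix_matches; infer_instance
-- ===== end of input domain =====

-- B replaces A's enumeration of every proper '_'-prefix of each value (join + membership
-- test in `bases`, keeping the longest) by a single scan of `bases` per value, keeping the
-- bases that are proper underscore-prefixes via startswith and taking the longest with max;
-- a genuinely different traversal, not claimed faster (it can be slower when bases is large).

-- ===== PORT A =====
-- strings are handled on their List Char side (PySem.Chars), exact on the stated domain
def build_longest_prefix_matches (bases : List String) (values : List String) : List (String × List String) :=
  (values.foldl (fun d value =>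
      let parts := PySem.Chars.splitOn value.toList ['_']
      let best := (PySem.List.pyRange 1 (parts.length : Int) 1).foldl
        (fun best i =>
          let candidate := PySem.Chars.join ['_'] (PySem.List.slice parts none (some i))
          if (bases.map String.toList).contains candidate then
            match best with
            | none => some candidate
            | some b => if b.length < candidate.length then some candidate else best
          else best)
        none
      match best with
      | none => d
      | some bb => d.modify (String.ofList bb) [] (fun s => PySem.Set.add s value))
    PySem.Dict.empty).items

-- ===== PORT B =====
def build_longest_prefix_matches_alt (bases : List String) (values : List String) : List (String × List String) :=
  (values.foldl (fun d value =>
      match PySem.List.max?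
          (bases.filter (fun b => PySem.Chars.startswith value.toList (b.toList ++ ['_'])))
          (fun b => PySem.Str.len b) with
      | none => d
      | some best => d.modify best [] (fun s => PySem.Set.add s value))
    PySem.Dict.empty).items

-- ===== PRECONDITION & SPEC =====
def Spec_build_longest_prefix_matches (bases : List String) (values : List String) (out : List (String × List String)) : Prop := out = build_longest_prefix_matches_alt bases values
instance (bases : List String) (values : List String) (out : List (String × List String)) : Decidable (Spec_build_longest_prefix_matches bases values out) := by unfold Spec_build_longest_prefix_matches; infer_instance

-- ===== CLAIM (what is proved, stated in full; the proofs are below) =====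
def Claim_equal_build_longest_prefix_matches : Prop := ∀ (bases : List String) (values : List String), Dom_build_longest_prefix_matches bases values → Spec_build_longest_prefix_matches bases values (build_longest_prefix_matches bases values)

-- ===== LEMMAS AND PROOFS =====

theorem pvGo_spec (c : Char) (fuel : Nat) (l cur : List Char) (acc : List (List Char))
    (h : l.length ≤ fuel) :
    PySem.Chars.splitOn.go [c] fuel l cur acc
      = acc.reverse ++ List.modifyHead (cur.reverse ++ ·) (List.splitOn c l) := by
  induction fuel generalizing l cur acc with
  | zero =>
    have : l = [] := by cases l <;> simp_all
    subst this
    simp [PySem.Chars.splitOn.go, List.splitOn, List.splitOnP, List.splitOnP.go]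
  | succ fuel ih =>
    cases l with
    | nil => simp [PySem.Chars.splitOn.go, List.splitOn, List.splitOnP, List.splitOnP.go]
    | cons ch rest =>
      rw [PySem.Chars.splitOn.go]
      by_cases hc : ch = c
      · subst hc
        have hpre : [ch].isPrefixOf (ch :: rest) = true := by simp [List.isPrefixOf]
        rw [if_pos hpre]
        simp only [List.length_cons, List.length_nil, Nat.zero_add, List.drop_succ_cons,
          List.drop_zero]
        rw [ih rest [] (cur.reverse :: acc) (by simpa using Nat.le_of_succ_le_succ h)]
        simp only [List.splitOn]; rw [List.splitOnP_cons]
        simp only [List.reverse_cons, List.append_assoc, List.singleton_append, List.reverse_nil]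
        simp [show (fun x : List Char => x) = id from rfl, List.modifyHead_id]
      · have hpre : [c].isPrefixOf (ch :: rest) = false := by
          simp [List.isPrefixOf]; exact fun he => absurd he.symm hc
        rw [if_neg (by simp [hpre])]
        rw [ih rest (ch :: cur) acc (by simpa using Nat.le_of_succ_le_succ h)]
        simp only [List.splitOn]; rw [List.splitOnP_cons]
        have hbe : (ch == c) = false := by simp [hc]
        rw [hbe]
        simp only [Bool.false_eq_true, if_false]
        have hne := List.splitOnP_ne_nil (fun x => x == c) rest
        cases hsp : List.splitOnP (fun x => x == c) rest with
        | nil => exact absurd hsp hne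
        | cons hd tl => simp [List.splitOn, hsp, List.modifyHead]

theorem pvSplitOn_eq (c : Char) (cs : List Char) :
    PySem.Chars.splitOn cs [c] = List.splitOn c cs := by
  rw [PySem.Chars.splitOn, pvGo_spec c _ cs [] [] (Nat.le_succ _)]
  have hne := List.splitOnP_ne_nil (fun x => x == c) cs
  cases hsp : List.splitOnP (fun x => x == c) cs with
  | nil => exact absurd hsp hne
  | cons hd tl => simp [List.splitOn, hsp, List.modifyHead]

theorem pvNotMem_splitOn (c : Char) (cs : List Char) :
    ∀ p ∈ List.splitOn c cs, c ∉ p := by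
  induction cs with
  | nil =>
    intro p hp
    simp [List.splitOn, List.splitOnP, List.splitOnP.go] at hp
    simp [hp]
  | cons a rest ih =>
    intro p hp
    simp only [List.splitOn] at hp; rw [List.splitOnP_cons] at hp
    by_cases ha : a = c
    · simp [ha] at hp
      rcases hp with h | h
      · simp [h]
      · exact ih p (by rw [List.splitOn]; exact h)
    · have : (a == c) = false := by simp [ha]
      rw [this] at hp
      simp only [Bool.false_eq_true, if_false] at hp
      have hne := List.splitOnP_ne_nil (fun x => x == c) rest
      cases hsp : List.splitOnP (fun x => x == c) rest with
      | nil => exact absurd hsp hne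
      | cons hd tl =>
        rw [hsp] at hp
        simp [List.modifyHead] at hp
        rcases hp with h | h
        · subst h
          intro hmem
          rcases List.mem_cons.mp hmem with h' | h'
          · exact ha h'.symm
          · exact ih hd (by rw [List.splitOn, hsp]; exact List.mem_cons_self ..) h'
        · exact ih p (by rw [List.splitOn, hsp]; exact List.mem_cons_of_mem _ h)

theorem pvJoin_append_single (c : Char) (l : List (List Char)) (x : List Char) (h : l ≠ []) :
    PySem.Chars.join [c] (l ++ [x]) = PySem.Chars.join [c] l ++ [c] ++ x := by
  induction l with
  | nil => exact absurd rfl h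
  | cons p rest ih =>
    cases rest with
    | nil => simp [PySem.Chars.join_cons_cons, PySem.Chars.join_singleton]
    | cons q rest' =>
      have := ih (by simp)
      simp only [List.cons_append]
      rw [PySem.Chars.join_cons_cons, PySem.Chars.join_cons_cons]
      rw [show (q :: rest') ++ [x] = q :: (rest' ++ [x]) from rfl] at this
      rw [this]
      simp [List.append_assoc]

theorem pvJoin_take_succ (c : Char) (parts : List (List Char)) (i : Nat)
    (h1 : 1 ≤ i) (h2 : i < parts.length) :
    PySem.Chars.join [c] (parts.take (i + 1))
      = PySem.Chars.join [c] (parts.take i) ++ [c] ++ parts[i] := by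
  rw [List.take_add_one, List.getElem?_eq_getElem h2]
  simp only [Option.toList_some]
  refine pvJoin_append_single c _ _ ?_
  rw [Ne, List.take_eq_nil_iff]
  push Not
  constructor <;> [omega; (intro hp; subst hp; simp at h2)]

theorem pvJoin_take_lt (c : Char) (parts : List (List Char)) (i j : Nat)
    (h1 : 1 ≤ i) (hij : i < j) (hj : j ≤ parts.length) :
    (PySem.Chars.join [c] (parts.take i)).length < (PySem.Chars.join [c] (parts.take j)).length := by
  induction j with
  | zero => omega
  | succ j ihj =>
    have hjlt : j < parts.length := by omega
    rw [pvJoin_take_succ c parts j (by omega) hjlt]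
    simp only [List.length_append, List.length_cons, List.length_nil]
    rcases Nat.lt_or_ge i j with h | h
    · have := ihj h (by omega)
      omega
    · have : i = j := by omega
      subst this
      omega

theorem pvJoin_cons (c : Char) (x : List Char) (L : List (List Char)) (h : L ≠ []) :
    PySem.Chars.join [c] (x :: L) = x ++ [c] ++ PySem.Chars.join [c] L := by
  cases L with
  | nil => exact absurd rfl h
  | cons y t => rw [PySem.Chars.join_cons_cons]

theorem pvTake_ne_nil {α : Type} (l : List α) (i : Nat) (h1 : 1 ≤ i) (h2 : l ≠ []) :
    l.take i ≠ [] := by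
  rw [Ne, List.take_eq_nil_iff]
  rintro (h | h)
  · omega
  · exact h2 h

theorem pvPrefix_iff (c : Char) (parts : List (List Char)) (hfree : ∀ p ∈ parts, c ∉ p)
    (b : List Char) :
    (b ++ [c] <+: PySem.Chars.join [c] parts)
      ↔ ∃ i, 1 ≤ i ∧ i < parts.length ∧ b = PySem.Chars.join [c] (parts.take i) := by
  induction parts generalizing b with
  | nil =>
    rw [PySem.Chars.join_nil]
    simp
  | cons p rest ih =>
    cases rest with
    | nil =>
      rw [PySem.Chars.join_singleton]
      constructor
      · intro h
        exact absurd (List.IsPrefix.mem (by simp) h) (hfree p (by simp))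
      · rintro ⟨i, h1, h2, -⟩
        simp at h2; omega
    | cons q rest' =>
      rw [PySem.Chars.join_cons_cons]
      have hfree' : ∀ x ∈ q :: rest', c ∉ x := fun x hx => hfree x (List.mem_cons_of_mem _ hx)
      set J' := PySem.Chars.join [c] (q :: rest') with hJ'
      constructor
      · intro h
        rcases Nat.lt_trichotomy b.length p.length with hlen | hlen | hlen
        · -- b shorter than p : c would occur inside p
          have hbc : b ++ [c] <+: p := by
            refine List.prefix_of_prefix_length_le h
              ((List.prefix_append p [c]).trans (List.prefix_append (p ++ [c]) J')) ?_
            simp; omega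
          exact absurd (List.IsPrefix.mem (by simp) hbc) (hfree p (by simp))
        · -- b = p : i = 1
          have hb : b <+: p ++ [c] ++ J' := (List.prefix_append b [c]).trans h
          have hp : p <+: p ++ [c] ++ J' :=
            (List.prefix_append p [c]).trans (List.prefix_append (p ++ [c]) J')
          have hbp : b = p := (List.prefix_of_prefix_length_le hb hp (by omega)).eq_of_length hlen
          exact ⟨1, le_refl 1, by simp, by simpa [PySem.Chars.join_singleton] using hbp⟩
        · -- b longer : peel off p ++ [c] and use the induction hypothesis
          have hA : p ++ [c] <+: b ++ [c] :=
            List.prefix_of_prefix_length_le (List.prefix_append (p ++ [c]) J') h (by simp; omega)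
          have hpcb : p ++ [c] <+: b :=
            List.prefix_of_prefix_length_le hA (List.prefix_append b [c]) (by simp; omega)
          obtain ⟨b', hb'⟩ := hpcb
          have hbeq : b = p ++ [c] ++ b' := by rw [← hb']
          subst hbeq
          simp only [List.append_assoc] at h
          rw [List.prefix_append_right_inj, List.prefix_append_right_inj] at h
          obtain ⟨i', h1', h2', heq⟩ := (ih hfree' b').mp h
          refine ⟨i' + 1, by omega, by simp at h2' ⊢; omega, ?_⟩
          rw [List.take_succ_cons, pvJoin_cons c p _ (pvTake_ne_nil _ _ (by omega) (by simp))]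
          rw [← heq]
      · rintro ⟨i, h1, h2, heq⟩
        rcases Nat.lt_or_ge i 2 with hi | hi
        · -- i = 1
          have hone : i = 1 := by omega
          subst hone
          rw [List.take_succ_cons, List.take_zero, PySem.Chars.join_singleton] at heq
          subst heq
          rw [List.append_assoc]
          exact (List.prefix_append (b ++ [c]) J').trans (by rw [List.append_assoc])
        · -- i ≥ 2
          have htake : (p :: q :: rest').take i = p :: (q :: rest').take (i - 1) := by
            cases i with
            | zero => omega
            | succ n => rw [List.take_succ_cons]; simp
          rw [htake, pvJoin_cons c p _ (pvTake_ne_nil _ _ (by omega) (by simp))] at heq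
          have h' : PySem.Chars.join [c] ((q :: rest').take (i - 1)) ++ [c] <+: J' :=
            (ih hfree' _).mpr ⟨i - 1, by omega, by simp at h2 ⊢; omega, rfl⟩
          rw [heq]
          simp only [List.append_assoc]
          rw [List.prefix_append_right_inj, List.prefix_append_right_inj]
          exact h'

theorem pvRange_form (n : Nat) :
    PySem.List.pyRange 1 (n : Int) 1 = (List.range (n - 1)).map (fun k : Nat => 1 + (k : Int)) := by
  rw [PySem.List.pyRange]
  norm_num
  have h0 : (if 1 < n then n - 1 else 0) = n - 1 := by split_ifs <;> omega
  rw [h0]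

theorem pvFold_pick_last (g : Nat → List Char) (ks : List Nat)
    (hmono : ks.Pairwise (fun a b => (g a).length < (g b).length)) (acc : Option (List Char))
    (hacc : ∀ bb, acc = some bb → ∀ k ∈ ks, bb.length < (g k).length) :
    ks.foldl (fun best k =>
        match best with
        | none => some (g k)
        | some b => if b.length < (g k).length then some (g k) else best) acc
      = match ks.getLast? with | none => acc | some k => some (g k) := by
  induction ks generalizing acc with
  | nil => simp
  | cons k rest ih =>
    rw [List.pairwise_cons] at hmono
    have htail : ∀ (acc' : Option (List Char)),
        acc' = some (g k) →
        List.foldl (fun best k =>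
          match best with
          | none => some (g k)
          | some b => if b.length < (g k).length then some (g k) else best) acc' rest
        = match (k :: rest).getLast? with | none => acc | some j => some (g j) := by
      intro acc' h'
      subst h'
      rw [ih hmono.2 _ (by rintro bb ⟨rfl⟩ j hj; exact hmono.1 j hj)]
      cases rest with
      | nil => simp
      | cons r t =>
        rw [List.getLast?_cons_cons]
        cases hg : (r :: t).getLast? with
        | none => rw [List.getLast?_eq_none_iff] at hg; exact absurd hg (by simp)
        | some j => rfl
    cases acc with
    | none => exact htail _ rfl
    | some b =>
      rw [List.foldl_cons]
      have hlt := hacc b rfl k (by simp)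
      exact htail _ (by simp [hlt])

theorem pvPairwise_getLast {α : Type} {R : α → α → Prop} (l : List α) (h : l.Pairwise R)
    {x : α} (hx : l.getLast? = some x) : ∀ y ∈ l, y = x ∨ R y x := by
  induction l with
  | nil => simp at hx
  | cons a rest ih =>
    rw [List.pairwise_cons] at h
    cases rest with
    | nil =>
      simp at hx
      intro y hy
      simp at hy
      subst hx; subst hy; exact Or.inl rfl
    | cons r t =>
      rw [List.getLast?_cons_cons] at hx
      intro y hy
      rcases List.mem_cons.mp hy with rfl | hy'
      · exact Or.inr (h.1 x (List.mem_of_getLast? hx))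
      · exact ih h.2 hx y hy'

theorem pvJoin_eq_intercalate (sep : List Char) (l : List (List Char)) :
    PySem.Chars.join sep l = sep.intercalate l := rfl

theorem pvInner_eq (bases : List String) (value : String) :
    ((PySem.List.pyRange 1 ((PySem.Chars.splitOn value.toList ['_']).length : Int) 1).foldl
      (fun best i =>
        let candidate := PySem.Chars.join ['_'] (PySem.List.slice (PySem.Chars.splitOn value.toList ['_']) none (some i))
        if (bases.map String.toList).contains candidate then
          match best with
          | none => some candidate
          | some b => if b.length < candidate.length then some candidate else best
        else best) none).map String.ofList
    = PySem.List.max? (bases.filter (fun b => PySem.Chars.startswith value.toList (b.toList ++ ['_'])))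
        (fun b => PySem.Str.len b) := by
  have hsplit : PySem.Chars.splitOn value.toList ['_'] = List.splitOn '_' value.toList :=
    pvSplitOn_eq '_' value.toList
  set cs := value.toList with hcs0
  set parts := PySem.Chars.splitOn cs ['_'] with hpartsdef
  have hfree : ∀ p ∈ parts, '_' ∉ p := by rw [hsplit]; exact pvNotMem_splitOn '_' cs
  have hjoin : PySem.Chars.join ['_'] parts = cs := by
    rw [hsplit, pvJoin_eq_intercalate]; exact List.intercalate_splitOn cs '_'
  have hne : parts ≠ [] := by rw [hsplit]; exact List.splitOnP_ne_nil _ _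
  set n := parts.length with hn
  have hn1 : 1 ≤ n := List.length_pos_iff.mpr hne
  set g : Nat → List Char := fun i => PySem.Chars.join ['_'] (parts.take i) with hg
  -- rewrite the loop over pyRange into a loop over List.range
  rw [pvRange_form n, List.foldl_map]
  have hslice : ∀ k : Nat, PySem.List.slice parts none (some (1 + (k : Int))) = parts.take (k + 1) := by
    intro k
    have h1 : (1 + (k : Int)) = ((k + 1 : Nat) : Int) := by push_cast; ring
    rw [h1, PySem.List.slice_to_natCast]
  simp only [hslice]
  rw [PySem.List.foldl_if_eq_foldl_filter
    (p := fun k : Nat => (bases.map String.toList).contains (g (k + 1)))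
    (f := fun (best : Option (List Char)) (k : Nat) =>
      match best with
      | none => some (g (k + 1))
      | some b => if b.length < (g (k + 1)).length then some (g (k + 1)) else best)]
  set ks := (List.range (n - 1)).filter
    (fun k : Nat => (bases.map String.toList).contains (g (k + 1))) with hksdef
  have hks_lt : ∀ k ∈ ks, k < n - 1 := by
    intro k hk
    exact List.mem_range.mp (List.mem_of_mem_filter hk)
  have hmono : ks.Pairwise (fun a b => (g (a + 1)).length < (g (b + 1)).length) := by
    refine (List.Pairwise.sublist List.filter_sublist List.pairwise_lt_range).imp_of_mem ?_
    intro a b ha hb hab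
    exact pvJoin_take_lt '_' parts (a + 1) (b + 1) (by omega) (by omega)
      (by have := hks_lt b hb; omega)
  rw [pvFold_pick_last (fun k => g (k + 1)) ks hmono none (by intro bb h; cases h)]
  -- characterisations of membership
  have hcont : ∀ x : List Char, ((bases.map String.toList).contains x = true) ↔ ∃ b ∈ bases, b.toList = x := by
    intro x
    rw [List.contains_iff_mem, List.mem_map]
  have hpref : ∀ b : List Char, (b ++ ['_'] <+: cs) ↔ ∃ i, 1 ≤ i ∧ i < n ∧ b = g i := by
    intro b
    rw [← hjoin]
    exact pvPrefix_iff '_' parts hfree b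
  set M := bases.filter (fun b => PySem.Chars.startswith cs (b.toList ++ ['_'])) with hMdef
  have hMmem : ∀ b : String, b ∈ M ↔ (b ∈ bases ∧ ∃ i, 1 ≤ i ∧ i < n ∧ b.toList = g i) := by
    intro b
    rw [List.mem_filter, PySem.Chars.startswith_iff, hpref]
  have hkp : ∀ k : Nat, k ∈ ks ↔ (k < n - 1 ∧ ∃ b ∈ bases, b.toList = g (k + 1)) := by
    intro k
    rw [hksdef, List.mem_filter, List.mem_range, hcont]
  cases hlast : ks.getLast? with
  | none =>
    have hksnil : ks = [] := List.getLast?_eq_none_iff.mp hlast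
    simp only [Option.map_none]
    symm
    rw [PySem.List.max?_eq_none_iff]
    rw [List.eq_nil_iff_forall_not_mem]
    intro b hb
    obtain ⟨hbB, i, hi1, hin, hbeq⟩ := (hMmem b).mp hb
    have : (i - 1) ∈ ks := (hkp (i - 1)).mpr ⟨by omega, b, hbB, by rw [show i - 1 + 1 = i by omega]; exact hbeq⟩
    rw [hksnil] at this
    cases this
  | some kL =>
    have hkLmem : kL ∈ ks := List.mem_of_getLast? hlast
    obtain ⟨hkLlt, bb, hbbB, hbbeq⟩ := (hkp kL).mp hkLmem
    have hbbM : bb ∈ M := (hMmem bb).mpr ⟨hbbB, kL + 1, by omega, by omega, hbbeq⟩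
    cases hmax : PySem.List.max? M (fun b => PySem.Str.len b) with
    | none =>
      rw [PySem.List.max?_eq_none_iff] at hmax
      rw [hmax] at hbbM
      cases hbbM
    | some mx =>
      have hmxM : mx ∈ M := PySem.List.max?_mem hmax
      have hmax_ge : ∀ y ∈ M, PySem.Str.len y ≤ PySem.Str.len mx := PySem.List.max?_isMax hmax
      obtain ⟨hmxB, imx, himx1, himxn, hmxeq⟩ := (hMmem mx).mp hmxM
      have hkmx : (imx - 1) ∈ ks := (hkp (imx - 1)).mpr ⟨by omega, mx, hmxB, by rw [show imx - 1 + 1 = imx by omega]; exact hmxeq⟩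
      have hle1 : mx.toList.length ≤ (g (kL + 1)).length := by
        rcases pvPairwise_getLast ks hmono hlast (imx - 1) hkmx with heq | hlt
        · rw [hmxeq, show imx = imx - 1 + 1 by omega, heq]
        · rw [hmxeq, show imx = imx - 1 + 1 by omega]
          exact le_of_lt hlt
      have hle2 : (g (kL + 1)).length ≤ mx.toList.length := by
        have := hmax_ge bb hbbM
        simp only [PySem.Str.len] at this
        rw [← hbbeq]
        exact_mod_cast this
      have hlen : mx.toList.length = (g (kL + 1)).length := le_antisymm hle1 hle2
      -- both mx.toList ++ ['_'] and g (kL+1) ++ ['_'] are prefixes of cs of the same length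
      have hp1 : mx.toList ++ ['_'] <+: cs := (hpref mx.toList).mpr ⟨imx, himx1, himxn, hmxeq⟩
      have hp2 : (g (kL + 1)) ++ ['_'] <+: cs := (hpref (g (kL + 1))).mpr ⟨kL + 1, by omega, by omega, rfl⟩
      have heqp : mx.toList ++ ['_'] = g (kL + 1) ++ ['_'] :=
        (List.prefix_of_prefix_length_le hp1 hp2 (by simp [hlen])).eq_of_length (by simp [hlen])
      have heq : mx.toList = g (kL + 1) := List.append_cancel_right heqp
      simp only [Option.map_some]
      rw [← heq, String.ofList_toList]

theorem pvFinal (bases values : List String) :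
    build_longest_prefix_matches bases values = build_longest_prefix_matches_alt bases values := by
  unfold build_longest_prefix_matches build_longest_prefix_matches_alt
  refine congrArg PySem.Dict.items ?_
  refine PySem.List.foldl_congr_mem values _ _ _ ?_
  intro d value hv
  have h := pvInner_eq bases value
  dsimp only []
  cases hA : (PySem.List.pyRange 1 ((PySem.Chars.splitOn value.toList ['_']).length : Int) 1).foldl
      (fun best i =>
        let candidate := PySem.Chars.join ['_'] (PySem.List.slice (PySem.Chars.splitOn value.toList ['_']) none (some i))
        if (bases.map String.toList).contains candidate then
          match best with
          | none => some candidate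
          | some b => if b.length < candidate.length then some candidate else best
        else best) none with
  | none =>
    rw [hA] at h
    simp only [Option.map_none] at h
    rw [← h]
  | some bb =>
    rw [hA] at h
    simp only [Option.map_some] at h
    rw [← h]

-- ===== VERDICT (by name: the statement is the Claim_ definition above) =====
theorem build_longest_prefix_matches_spec : Claim_equal_build_longest_prefix_matches := by
  intro bases values _
  unfold Spec_build_longest_prefix_matches
  exact pvFinal bases values
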